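-- pv_equiv track=rewrite | github.com/katha-begin/LRCTOOLSBOX | maya/lrc_toolbox/utils/frame_parser.py | format_frame_range
-- ===== SOURCE A (Python) =====
-- from typing import List, Set, Tuple
--
-- def format_frame_range(frames: List[int]) -> str:
--     """
--     Format list of frames into compact range string.
--
--     Args:
--         frames: List of frame numbers
--
--     Returns:
--         Formatted frame range string
--
--     Examples:
--         >>> format_frame_range([1, 2, 3, 4, 5])
--         "1-5"
--
--         >>> format_frame_range([1, 5, 10, 15])
--         "1,5,10,15"
--
--         >>> format_frame_range([1, 2, 3, 10, 11, 12])
--         "1-3,10-12"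
--     """
--     if not frames:
--         return ""
--
--     sorted_frames = sorted(frames)
--     ranges = []
--
--     start = sorted_frames[0]
--     end = start
--
--     for i in range(1, len(sorted_frames)):
--         if sorted_frames[i] == end + 1:
--             # Continue range
--             end = sorted_frames[i]
--         else:
--             # End current range, start new one
--             if start == end:
--                 ranges.append(str(start))
--             else:
--                 ranges.append(f"{start}-{end}")
--
--             start = sorted_frames[i]
--             end = start
--
--     # Add final range
--     if start == end:
--         ranges.append(str(start))
--     else:
--         ranges.append(f"{start}-{end}")
--
--     return ",".join(ranges)
-- ===== SOURCE B (Python) =====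
-- def format_frame_range(frames):
--     if not frames:
--         return ""
--     s = sorted(frames)
--     brk = [(a, b) for a, b in zip(s, s[1:]) if b != a + 1]
--     starts = [s[0]] + [b for _, b in brk]
--     ends = [a for a, _ in brk] + [s[-1]]
--     return ",".join(str(f) if f == l else f"{f}-{l}" for f, l in zip(starts, ends))
-- ===== Notes on version B (the rewrite author's own statement) =====
-- stated objective: alternative
-- what changed: Instead of a stateful loop that tracks a current (start,end) range and flushes on each break plus a final flush, B derives the run boundaries declaratively: it collects the adjacent pairs of the sorted list where consecutiveness breaks, builds the run-start list ([s[0]] + break successors) and run-end list (break predecessors + [s[-1]]), and zips them to format each run.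
import Mathlib
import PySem

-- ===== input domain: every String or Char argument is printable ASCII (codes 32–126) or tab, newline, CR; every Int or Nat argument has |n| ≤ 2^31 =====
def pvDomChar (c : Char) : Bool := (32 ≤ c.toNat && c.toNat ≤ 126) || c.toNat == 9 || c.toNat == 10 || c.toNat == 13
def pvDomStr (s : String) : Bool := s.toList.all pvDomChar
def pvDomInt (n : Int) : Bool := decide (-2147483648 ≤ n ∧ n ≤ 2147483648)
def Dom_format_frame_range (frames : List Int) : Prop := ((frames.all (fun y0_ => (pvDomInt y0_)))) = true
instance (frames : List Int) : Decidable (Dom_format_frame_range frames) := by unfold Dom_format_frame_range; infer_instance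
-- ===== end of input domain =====

-- B replaces A's stateful range-accumulating loop by a declarative decomposition:
-- break pairs of the sorted list give run starts and run ends, zipped and formatted (objective: alternative).


-- ===== PORT A =====
-- loop body of A's for-loop (state = (ranges, start, end))
def fa_step (st : List String × Int × Int) (v : Int) : List String × Int × Int :=
  if v = st.2.2 + 1 then (st.1, st.2.1, v)
  else (st.1 ++ [if st.2.1 = st.2.2 then PySem.Int.toStr st.2.1
                 else PySem.Int.toStr st.2.1 ++ "-" ++ PySem.Int.toStr st.2.2], v, v)

def format_frame_range (frames : List Int) : String :=
  if frames = [] then ""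
  else
    let sorted_frames := PySem.List.sorted frames (fun x => x) false
    let start := PySem.List.pyGetD sorted_frames 0 0
    let st := (PySem.List.pyRange 1 (sorted_frames.length : Int) 1).foldl
        (fun st i => fa_step st (PySem.List.pyGetD sorted_frames i 0)) ([], start, start)
    PySem.Str.join "," (st.1 ++ [if st.2.1 = st.2.2 then PySem.Int.toStr st.2.1
                                 else PySem.Int.toStr st.2.1 ++ "-" ++ PySem.Int.toStr st.2.2])

-- ===== PORT B =====
def format_frame_range_alt (frames : List Int) : String :=
  if frames = [] then ""
  else
    let s := PySem.List.sorted frames (fun x => x) false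
    let brk := (s.zip (PySem.List.slice s (some 1) none)).filter (fun p => !(p.2 == p.1 + 1))
    let starts := PySem.List.pyGetD s 0 0 :: brk.map (fun p => p.2)
    let ends := brk.map (fun p => p.1) ++ [PySem.List.pyGetD s (-1) 0]
    PySem.Str.join "," ((starts.zip ends).map (fun p =>
      if p.1 = p.2 then PySem.Int.toStr p.1
      else PySem.Int.toStr p.1 ++ "-" ++ PySem.Int.toStr p.2))

-- ===== PRECONDITION & SPEC =====
def Spec_format_frame_range (frames : List Int) (out : String) : Prop := out = format_frame_range_alt frames
instance (frames : List Int) (out : String) : Decidable (Spec_format_frame_range frames out) := by unfold Spec_format_frame_range; infer_instance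

-- ===== CLAIM (what is proved, stated in full; the proofs are below) =====
def Claim_equal_format_frame_range : Prop := ∀ (frames : List Int), Dom_format_frame_range frames → Spec_format_frame_range frames (format_frame_range frames)

-- ===== LEMMAS AND PROOFS =====

-- reference description of the runs: list of (start, end) pairs, as A's loop produces them
def fz_runsAux (start end_ : Int) : List Int → List (Int × Int)
  | [] => [(start, end_)]
  | v :: vs => if v = end_ + 1 then fz_runsAux start v vs else (start, end_) :: fz_runsAux v v vs

def fz_render (p : Int × Int) : String :=
  if p.1 = p.2 then PySem.Int.toStr p.1 else PySem.Int.toStr p.1 ++ "-" ++ PySem.Int.toStr p.2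

-- A's loop, folded over the tail of the sorted list, plus the final flush, yields the rendered runs
lemma fa_loop_eq (xs : List Int) : ∀ (acc : List String) (start end_ : Int),
    (xs.foldl fa_step (acc, start, end_)).1
      ++ [if (xs.foldl fa_step (acc, start, end_)).2.1 = (xs.foldl fa_step (acc, start, end_)).2.2
          then PySem.Int.toStr (xs.foldl fa_step (acc, start, end_)).2.1
          else PySem.Int.toStr (xs.foldl fa_step (acc, start, end_)).2.1 ++ "-"
               ++ PySem.Int.toStr (xs.foldl fa_step (acc, start, end_)).2.2]
    = acc ++ (fz_runsAux start end_ xs).map fz_render := by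
  induction xs with
  | nil => intro acc start end_; simp [fz_runsAux, fz_render]
  | cons v vs ih =>
    intro acc start end_
    by_cases h : v = end_ + 1
    · simp [List.foldl_cons, fa_step, h, fz_runsAux, ih]
    · simp [List.foldl_cons, fa_step, h, fz_runsAux, ih, fz_render]

-- B's starts/ends zip equals the reference runs
lemma fz_zip_breaks (xs : List Int) : ∀ (start prev : Int),
    ((start :: (((prev :: xs).zip xs).filter (fun p => !(p.2 == p.1 + 1))).map (fun p => p.2)).zip
      ((((prev :: xs).zip xs).filter (fun p => !(p.2 == p.1 + 1))).map (fun p => p.1)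
        ++ [xs.getLastD prev]))
    = fz_runsAux start prev xs := by
  induction xs with
  | nil => intro start prev; simp [fz_runsAux]
  | cons v vs ih =>
    intro start prev
    rw [show (prev :: v :: vs).zip (v :: vs) = (prev, v) :: ((v :: vs).zip vs) from rfl,
        show (v :: vs).getLastD prev = vs.getLastD v from List.getLastD_cons]
    by_cases h : v = prev + 1
    · have hfc : ((prev, v) :: ((v :: vs).zip vs)).filter (fun p => !(p.2 == p.1 + 1))
          = ((v :: vs).zip vs).filter (fun p => !(p.2 == p.1 + 1)) := by
        rw [List.filter_cons]; simp [h]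
      rw [hfc]
      simp only [fz_runsAux, if_pos h]
      exact ih start v
    · have hfc : ((prev, v) :: ((v :: vs).zip vs)).filter (fun p => !(p.2 == p.1 + 1))
          = (prev, v) :: ((v :: vs).zip vs).filter (fun p => !(p.2 == p.1 + 1)) := by
        rw [List.filter_cons]; simp [h]
      rw [hfc]
      simp only [List.map_cons, List.cons_append, List.zip_cons_cons, fz_runsAux, if_neg h]
      exact congrArg (List.cons (start, prev)) (ih v v)

-- ===== VERDICT (by name: the statement is the Claim_ definition above) =====
theorem format_frame_range_spec : Claim_equal_format_frame_range := by
  intro frames _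
  unfold Spec_format_frame_range format_frame_range format_frame_range_alt
  by_cases hf : frames = []
  · simp [hf]
  · simp only [hf, if_false]
    obtain ⟨h, t, hst⟩ := List.exists_cons_of_ne_nil
      (show PySem.List.sorted frames (fun x => x) false ≠ [] by
        simp [PySem.List.sorted_eq_nil_iff, hf])
    rw [hst]
    rw [PySem.List.foldl_pyRange_pyGetD' (h :: t) 0 fa_step
        ([], PySem.List.pyGetD (h :: t) 0 0, PySem.List.pyGetD (h :: t) 0 0) (by omega)]
    rw [fa_loop_eq]
    rw [PySem.List.slice_from (h :: t) (by omega)]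
    rw [PySem.List.pyGetD_neg_one (h :: t) 0 (by simp)]
    rw [List.getLast_eq_getLastD]
    simp only [Int.toNat_one, List.drop_one, List.tail_cons, PySem.List.pyGetD_zero_cons,
      List.nil_append]
    rw [fz_zip_breaks]
    rfl
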